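-- pv_equiv track=rewrite | github.com/elifesciences/elife-bot | provider/ocr.py | math_data_parts
-- ===== SOURCE A (Python) =====
-- def math_data_parts(math_data):
--     "from a list math_data find the different types of data"
--     mathml_data = None
--     latex_data = None
--     for math_data_row in math_data:
--         if math_data_row.get("type") == "mathml":
--             mathml_data = math_data_row
--             continue
--         if math_data_row.get("type") == "latex":
--             latex_data = math_data_row
--     return mathml_data, latex_data
-- ===== SOURCE B (Python) =====
-- def math_data_parts(math_data):
--     "from a list math_data find the different types of data"
--     mathml_data = None
--     latex_data = None
--     for math_data_row in reversed(math_data):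
--         row_type = math_data_row.get("type")
--         if mathml_data is None and row_type == "mathml":
--             mathml_data = math_data_row
--         elif latex_data is None and row_type == "latex":
--             latex_data = math_data_row
--         if mathml_data is not None and latex_data is not None:
--             break
--     return mathml_data, latex_data
-- ===== Notes on version B (the rewrite author's own statement) =====
-- stated objective: alternative
-- what changed: B scans the list from the end, keeping the first 'mathml'/'latex' rows it meets and breaking as soon as both are found, instead of A's forward scan where the last match wins by overwrite.
import Mathlib
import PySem

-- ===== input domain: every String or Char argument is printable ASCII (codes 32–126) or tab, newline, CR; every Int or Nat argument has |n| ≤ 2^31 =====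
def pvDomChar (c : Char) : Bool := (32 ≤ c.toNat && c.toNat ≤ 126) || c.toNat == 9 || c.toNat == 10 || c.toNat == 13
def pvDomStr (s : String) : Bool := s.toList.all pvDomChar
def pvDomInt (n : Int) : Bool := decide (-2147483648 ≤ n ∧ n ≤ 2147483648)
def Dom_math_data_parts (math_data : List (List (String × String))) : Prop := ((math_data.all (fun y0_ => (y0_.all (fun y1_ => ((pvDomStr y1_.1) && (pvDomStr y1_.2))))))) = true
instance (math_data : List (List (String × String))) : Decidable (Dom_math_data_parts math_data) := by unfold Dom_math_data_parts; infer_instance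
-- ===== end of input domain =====

-- B scans from the end with an early break instead of A's forward overwrite scan; objective: alternative decomposition, same cost.

-- ===== PORT A =====
-- row.get("type") on an assoc-list dict: first-match lookup
def pvGetType (row : List (String × String)) : Option String :=
  List.lookup "type" row

def math_data_parts (math_data : List (List (String × String))) : (Option (List (String × String))) × (Option (List (String × String))) :=
  math_data.foldl
    (fun st row =>
      if pvGetType row = some "mathml" then (some row, st.2)
      else if pvGetType row = some "latex" then (st.1, some row)
      else st)
    (none, none)

-- ===== PORT B =====
def pvBLoop : List (List (String × String)) → (Option (List (String × String))) × (Option (List (String × String))) → (Option (List (String × String))) × (Option (List (String × String)))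
  | [], st => st
  | row :: rest, st =>
    let t := pvGetType row
    let st' :=
      if st.1 = none ∧ t = some "mathml" then (some row, st.2)
      else if st.2 = none ∧ t = some "latex" then (st.1, some row)
      else st
    if st'.1 ≠ none ∧ st'.2 ≠ none then st' else pvBLoop rest st'

def math_data_parts_alt (math_data : List (List (String × String))) : (Option (List (String × String))) × (Option (List (String × String))) :=
  pvBLoop math_data.reverse (none, none)

-- ===== PRECONDITION & SPEC =====
def Spec_math_data_parts (math_data : List (List (String × String))) (out : (Option (List (String × String))) × (Option (List (String × String)))) : Prop := out = math_data_parts_alt math_data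
instance (math_data : List (List (String × String))) (out : (Option (List (String × String))) × (Option (List (String × String)))) : Decidable (Spec_math_data_parts math_data out) := by unfold Spec_math_data_parts; infer_instance

-- ===== CLAIM (what is proved, stated in full; the proofs are below) =====
def Claim_equal_math_data_parts : Prop := ∀ (math_data : List (List (String × String))), Dom_math_data_parts math_data → Spec_math_data_parts math_data (math_data_parts math_data)

-- ===== LEMMAS AND PROOFS =====
def pvIsM (r : List (String × String)) : Bool := pvGetType r == some "mathml"
def pvIsL (r : List (String × String)) : Bool := pvGetType r == some "latex"

theorem pvA_charac (l : List (List (String × String)))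
    (st : (Option (List (String × String))) × (Option (List (String × String)))) :
    l.foldl
      (fun st row =>
        if pvGetType row = some "mathml" then (some row, st.2)
        else if pvGetType row = some "latex" then (st.1, some row)
        else st) st
    = ((l.reverse.find? pvIsM).or st.1, (l.reverse.find? pvIsL).or st.2) := by
  induction l generalizing st with
  | nil => simp
  | cons row rest ih =>
    simp only [List.foldl_cons, List.reverse_cons, List.find?_append, ih]
    by_cases hm : pvGetType row = some "mathml"
    · have hl : ¬ pvGetType row = some "latex" := by simp [hm]
      simp [List.find?, pvIsM, pvIsL, hm, hl, Option.or_assoc]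
    · have hm' : (pvGetType row == some "mathml") = false := by simp [hm]
      by_cases hl : pvGetType row = some "latex"
      · simp [List.find?, pvIsM, pvIsL, hm, hm', hl, Option.or_assoc]
      · have hl' : (pvGetType row == some "latex") = false := by simp [hl]
        simp [List.find?, pvIsM, pvIsL, hm, hl, hm', hl']

theorem pvB_charac (l : List (List (String × String)))
    (st : (Option (List (String × String))) × (Option (List (String × String)))) :
    pvBLoop l st = (st.1.or (l.find? pvIsM), st.2.or (l.find? pvIsL)) := by
  induction l generalizing st with
  | nil => simp [pvBLoop]
  | cons row rest ih =>
    obtain ⟨m, lt⟩ := st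
    by_cases hm : pvGetType row = some "mathml"
    · have hl : ¬ pvGetType row = some "latex" := by simp [hm]
      cases m with
      | none =>
        cases lt with
        | none => simp [pvBLoop, hm, hl, ih, List.find?, pvIsM, pvIsL]
        | some y => simp [pvBLoop, hm, hl, List.find?, pvIsM, pvIsL]
      | some x =>
        cases lt with
        | none => simp [pvBLoop, hm, hl, ih, List.find?, pvIsM, pvIsL]
        | some y => simp [pvBLoop, hm, hl, List.find?, pvIsM, pvIsL]
    · by_cases hl : pvGetType row = some "latex"
      · cases m with
        | none =>
          cases lt with
          | none => simp [pvBLoop, hm, hl, ih, List.find?, pvIsM, pvIsL]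
          | some y => simp [pvBLoop, hm, hl, ih, List.find?, pvIsM, pvIsL]
        | some x =>
          cases lt with
          | none => simp [pvBLoop, hm, hl, List.find?, pvIsM, pvIsL]
          | some y => simp [pvBLoop, hm, hl, List.find?, pvIsM, pvIsL]
      · have hm' : (pvGetType row == some "mathml") = false := by simp [hm]
        have hl' : (pvGetType row == some "latex") = false := by simp [hl]
        cases m with
        | none =>
          cases lt with
          | none => simp [pvBLoop, hm, hl, hm', hl', ih, List.find?, pvIsM, pvIsL]
          | some y => simp [pvBLoop, hm, hl, hm', hl', ih, List.find?, pvIsM, pvIsL]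
        | some x =>
          cases lt with
          | none => simp [pvBLoop, hm, hl, hm', hl', ih, List.find?, pvIsM, pvIsL]
          | some y => simp [pvBLoop, hm, hl, List.find?, pvIsM, pvIsL]

-- ===== VERDICT (by name: the statement is the Claim_ definition above) =====
theorem math_data_parts_spec : Claim_equal_math_data_parts := by
  intro md _
  unfold Spec_math_data_parts math_data_parts math_data_parts_alt
  rw [pvA_charac, pvB_charac]
  simp
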